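-- pv_equiv track=rewrite | github.com/sukhithms25/protothon_03 | git_tools/patch_applier.py | find_problem_region
-- ===== SOURCE A (Python) =====
-- def find_problem_region(content: str, keywords: list[str]) -> tuple[int, int]:
--     """
--     Locate the contiguous block of lines most likely containing the bug.
--
--     Returns (start_line, end_line) — 0-indexed, inclusive.
--     Falls back to (0, 0) if nothing is found.
--     """
--     lines = content.splitlines()
--     kw_lower = [kw.lower() for kw in keywords]
--
--     hit_indices = [
--         i for i, line in enumerate(lines)
--         if any(kw in line.lower() for kw in kw_lower)
--     ]
--
--     if not hit_indices:
--         return 0, 0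
--
--     # Expand the region slightly so we capture surrounding context
--     start = max(0, min(hit_indices) - 1)
--     end   = min(len(lines) - 1, max(hit_indices) + 2)
--     return start, end
-- ===== SOURCE B (Python) =====
-- def find_problem_region(content: str, keywords: list[str]) -> tuple[int, int]:
--     """Two bounded end-anchored scans instead of collecting all hit indices:
--     find the first matching line scanning forward, the last scanning backward."""
--     lines = content.splitlines()
--     kw_lower = [kw.lower() for kw in keywords]
--
--     def hit(line):
--         low = line.lower()
--         return any(kw in low for kw in kw_lower)
--
--     first = None
--     for i in range(len(lines)):
--         if hit(lines[i]):
--             first = i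
--             break
--     if first is None:
--         return 0, 0
--
--     last = first
--     for j in range(len(lines) - 1, -1, -1):
--         if hit(lines[j]):
--             last = j
--             break
--
--     return max(0, first - 1), min(len(lines) - 1, last + 2)
-- ===== Notes on version B (the rewrite author's own statement) =====
-- stated objective: alternative
-- what changed: Replaces the collect-all-hit-indices-then-min/max pass with two early-exiting scans (forward for the first matching line, backward for the last), never materialising the hit list.
import Mathlib
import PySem

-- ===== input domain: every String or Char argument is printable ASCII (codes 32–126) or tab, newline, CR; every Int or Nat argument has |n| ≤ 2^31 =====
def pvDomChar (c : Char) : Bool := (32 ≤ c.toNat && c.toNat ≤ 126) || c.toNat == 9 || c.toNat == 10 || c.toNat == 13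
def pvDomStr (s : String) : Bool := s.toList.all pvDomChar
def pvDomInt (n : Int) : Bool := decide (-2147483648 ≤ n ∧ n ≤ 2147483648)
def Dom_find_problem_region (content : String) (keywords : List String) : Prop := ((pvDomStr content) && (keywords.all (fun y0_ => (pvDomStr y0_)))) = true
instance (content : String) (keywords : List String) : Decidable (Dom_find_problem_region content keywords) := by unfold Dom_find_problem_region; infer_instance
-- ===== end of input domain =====

-- B replaces A's collect-all-hit-indices-then-min/max pass by two early-exiting scans
-- (forward for the first hit, backward for the last); alternative decomposition, return value identical.

-- ===== PORT A =====
def find_problem_region (content : String) (keywords : List String) : Int × Int :=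
  let lines := PySem.Str.splitlines content
  let kwLower := keywords.map PySem.Str.lower
  let hits : List Int := (PySem.List.enumerate lines 0).filterMap
    (fun x => if kwLower.any (fun kw => PySem.Str.isIn kw (PySem.Str.lower x.2)) then some x.1 else none)
  if hits.isEmpty then (0, 0)
  else
    let start := max 0 (((PySem.List.min? hits (fun x => x)).getD 0) - 1)
    let stop  := min ((lines.length : Int) - 1) (((PySem.List.max? hits (fun x => x)).getD 0) + 2)
    (start, stop)

-- ===== PORT B =====
-- forward scan: index of the first line satisfying p, counting from i
def pvFirstHit {α : Type} (p : α → Bool) : List α → Int → Option Int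
  | [], _ => none
  | a :: t, i => if p a then some i else pvFirstHit p t (i + 1)

-- backward scan: given the REVERSED list and the index of its head, first hit counting down
def pvLastHit {α : Type} (p : α → Bool) : List α → Int → Option Int
  | [], _ => none
  | a :: t, i => if p a then some i else pvLastHit p t (i - 1)

def find_problem_region_alt (content : String) (keywords : List String) : Int × Int :=
  let lines := PySem.Str.splitlines content
  let kwLower := keywords.map PySem.Str.lower
  let hit : String → Bool := fun line =>
    let low := PySem.Str.lower line
    kwLower.any (fun kw => PySem.Str.isIn kw low)
  match pvFirstHit hit lines 0 with
  | none => (0, 0)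
  | some first =>
    let last := (pvLastHit hit lines.reverse ((lines.length : Int) - 1)).getD first
    (max 0 (first - 1), min ((lines.length : Int) - 1) (last + 2))

-- ===== PRECONDITION & SPEC =====
def Spec_find_problem_region (content : String) (keywords : List String) (out : Int × Int) : Prop := out = find_problem_region_alt content keywords
instance (content : String) (keywords : List String) (out : Int × Int) : Decidable (Spec_find_problem_region content keywords out) := by unfold Spec_find_problem_region; infer_instance

-- ===== CLAIM (what is proved, stated in full; the proofs are below) =====
def Claim_equal_find_problem_region : Prop := ∀ (content : String) (keywords : List String), Dom_find_problem_region content keywords → Spec_find_problem_region content keywords (find_problem_region content keywords)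

-- ===== LEMMAS AND PROOFS =====

-- A's hit-index list, generically
def pvHits {α : Type} (p : α → Bool) (l : List α) (s : Int) : List Int :=
  (PySem.List.enumerate l s).filterMap (fun x => if p x.2 then some x.1 else none)

theorem pvHits_nil {α : Type} (p : α → Bool) (s : Int) : pvHits p [] s = [] := rfl

theorem pvHits_cons {α : Type} (p : α → Bool) (a : α) (l : List α) (s : Int) :
    pvHits p (a :: l) s = if p a then s :: pvHits p l (s + 1) else pvHits p l (s + 1) := by
  cases hp : p a <;> simp [pvHits, PySem.List.enumerate_cons, hp]

theorem pvHits_bounds {α : Type} (p : α → Bool) (l : List α) (s : Int) :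
    ∀ x ∈ pvHits p l s, s ≤ x ∧ x ≤ s + l.length - 1 := by
  induction l generalizing s with
  | nil => simp [pvHits_nil]
  | cons a t ih =>
    intro x hx
    rw [pvHits_cons] at hx
    split at hx
    · rcases List.mem_cons.mp hx with h | h
      · subst h
        refine ⟨le_refl _, ?_⟩
        simp only [List.length_cons]
        push_cast; omega
      · have := ih (s + 1) x h
        simp only [List.length_cons]
        push_cast at *; omega
    · have := ih (s + 1) x hx
      simp only [List.length_cons]
      push_cast at *; omega

theorem pvFoldl_min_eq {s : Int} (t : List Int) (h : ∀ x ∈ t, s ≤ x) :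
    t.foldl min s = s := by
  induction t generalizing s with
  | nil => rfl
  | cons a t ih =>
    have ha : min s a = s := min_eq_left (h a (by simp))
    simp only [List.foldl_cons, ha]
    exact ih (fun x hx => h x (by simp [hx]))

theorem pvFoldl_max_le {v : Int} (t : List Int) (x : Int) (hx : x ≤ v)
    (h : ∀ y ∈ t, y ≤ v) : t.foldl max x ≤ v := by
  induction t generalizing x with
  | nil => exact hx
  | cons a t ih =>
    simp only [List.foldl_cons]
    exact ih (max x a) (max_le hx (h a (by simp))) (fun y hy => h y (List.mem_cons_of_mem _ hy))

theorem pvFirstHit_eq_min {α : Type} (p : α → Bool) (l : List α) (s : Int) :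
    pvFirstHit p l s = PySem.List.min? (pvHits p l s) (fun x => x) := by
  induction l generalizing s with
  | nil => simp [pvFirstHit, pvHits_nil, PySem.List.min?]
  | cons a t ih =>
    rw [pvHits_cons]
    by_cases hp : p a
    · simp only [pvFirstHit, hp, if_true, PySem.List.min?_id_cons]
      have := pvHits_bounds p t (s + 1)
      rw [pvFoldl_min_eq _ (fun x hx => by have := this x hx; omega)]
    · simp only [pvFirstHit, hp, if_false, Bool.false_eq_true]
      exact ih (s + 1)

theorem pvLastHit_eq_max {α : Type} (p : α → Bool) (l : List α) (s : Int) :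
    pvLastHit p l.reverse (s + l.length - 1) = PySem.List.max? (pvHits p l s) (fun x => x) := by
  induction l using List.reverseRecOn generalizing s with
  | nil => simp only [List.reverse_nil, pvHits_nil]; rfl
  | append_singleton t a ih =>
    have hsplit : pvHits p (t ++ [a]) s
        = pvHits p t s ++ (if p a then [s + (t.length : Int)] else []) := by
      cases hp : p a <;>
        simp [pvHits, PySem.List.enumerate_append, List.filterMap_append,
          PySem.List.enumerate_cons, hp]
    have hrev : (t ++ [a]).reverse = a :: t.reverse := by simp
    have hlen : ((t ++ [a]).length : Int) = (t.length : Int) + 1 := by simp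
    rw [hrev, hlen, hsplit]
    by_cases hp : p a
    · simp only [pvLastHit, hp, if_true]
      have harg : s + ((t.length : Int) + 1) - 1 = s + (t.length : Int) := by ring
      rw [harg]
      -- max? (hits ++ [s+len t]) = some (s + len t)
      have hb := pvHits_bounds p t s
      cases hh : pvHits p t s with
      | nil => simp [PySem.List.max?]
      | cons x r =>
        simp only [List.cons_append, PySem.List.max?_id_cons]
        have hxv : x ≤ s + (t.length : Int) := by
          have := hb x (by rw [hh]; simp); omega
        have hrv : ∀ y ∈ r, y ≤ s + (t.length : Int) := by
          intro y hy; have := hb y (by rw [hh]; simp [hy]); omega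
        rw [List.foldl_append]
        have : r.foldl max x ≤ s + (t.length : Int) := pvFoldl_max_le r x hxv hrv
        simp [max_eq_right this]
    · simp only [pvLastHit, hp, if_false, Bool.false_eq_true, List.append_nil]
      have harg : s + ((t.length : Int) + 1) - 1 - 1 = s + (t.length : Int) - 1 := by ring
      rw [harg]
      exact ih s

-- ===== VERDICT (by name: the statement is the Claim_ definition above) =====
theorem find_problem_region_spec : Claim_equal_find_problem_region := by
  intro content keywords _
  unfold Spec_find_problem_region find_problem_region find_problem_region_alt
  set lines := PySem.Str.splitlines content with hl
  set kwLower := keywords.map PySem.Str.lower with hkw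
  set p : String → Bool := fun line =>
    kwLower.any (fun kw => PySem.Str.isIn kw (PySem.Str.lower line)) with hpdef
  simp only
  have hhits : (PySem.List.enumerate lines 0).filterMap
      (fun x => if kwLower.any (fun kw => PySem.Str.isIn kw (PySem.Str.lower x.2)) then some x.1 else none)
      = pvHits p lines 0 := rfl
  have hfirst : pvFirstHit (fun line => kwLower.any (fun kw => PySem.Str.isIn kw (PySem.Str.lower line))) lines 0
      = PySem.List.min? (pvHits p lines 0) (fun x => x) := pvFirstHit_eq_min p lines 0
  have hlastbase := pvLastHit_eq_max p lines 0
  rw [hhits]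
  cases hmin : PySem.List.min? (pvHits p lines 0) (fun x => x) with
  | none =>
    have hnil : pvHits p lines 0 = [] := (PySem.List.min?_eq_none_iff _ _).mp hmin
    rw [hfirst, hmin]
    simp [hnil]
  | some mn =>
    have hne : pvHits p lines 0 ≠ [] := by
      intro h; rw [h] at hmin; simp [PySem.List.min?] at hmin
    have hmax : ∃ mx, PySem.List.max? (pvHits p lines 0) (fun x => x) = some mx := by
      cases h : PySem.List.max? (pvHits p lines 0) (fun x => x) with
      | none => exact absurd ((PySem.List.max?_eq_none_iff _ _).mp h) hne
      | some mx => exact ⟨mx, rfl⟩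
    obtain ⟨mx, hmx⟩ := hmax
    rw [hfirst, hmin]
    simp only
    have hzero : (0 : Int) + (lines.length : Int) - 1 = (lines.length : Int) - 1 := by ring
    rw [hzero] at hlastbase
    rw [hlastbase, hmx]
    simp [List.isEmpty_iff, hne]
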